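-- pv_equiv track=rewrite | github.com/alexandraback/datacollection | solutions_5738606668808192_1/Python/fbossiere/CoinJam.py | solve
-- ===== SOURCE A (Python) =====
-- def is_not_prime(n):
--     for i in range(2, 10):
--         if n%i == 0:
--             return i
--     return None
--
-- def read_base(bits, base, powers_memory):
--     res = 0
--     for i, bit in enumerate(bits):
--         if bit == 1:
--             res += powers_memory[(base, len(bits) - 1 - i)]
--     return res
--
-- def solve(case, cartesian_products, powers_memory):
--     number_of_bits = case[1]
--     number_of_samples = case[2]
--     res = []
--     for partial_product in cartesian_products:
--         candidate_product = [1] + list(partial_product) + [1]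
--         if len(res) == number_of_samples:
--             return res
--         else:
--             aux = True
--             divisors = []
--             for base in range(2, 11):
--                 divisor = is_not_prime(read_base(candidate_product, base, powers_memory))
--                 if divisor:
--                     divisors.append(divisor)
--                 else:
--                     aux = False
--                     break
--             if aux:
--                 res.append((candidate_product, divisors))
-- ===== SOURCE B (Python) =====
-- def _horner(bits, base):
--     # value of the bit pattern in `base`, no power table needed
--     v = 0
--     for b in bits:
--         v = v * base + b
--     return v
--
--
-- def _small_divisor(v):
--     return next((i for i in range(2, 10) if v % i == 0), None)
--
--
-- def solve(case, cartesian_products, powers_memory):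
--     # stage 1: classify every candidate by direct Horner evaluation (the
--     # power table is ignored entirely); stage 2: keep the first `case[2]` hits,
--     # or None when fewer than that many jamcoins exist (the scan's contract)
--     hits = []
--     for pp in cartesian_products:
--         cand = [1, *pp, 1]
--         divs = [_small_divisor(_horner(cand, base)) for base in range(2, 11)]
--         if None not in divs:
--             hits.append((cand, divs))
--     res = hits[:case[2]]
--     return res if len(res) == case[2] else None
-- ===== Notes on version B (the rewrite author's own statement) =====
-- stated objective: alternative
-- what changed: B drops the precomputed power table entirely and evaluates each candidate by Horner's rule (res = res*base + bit), classifies every candidate in one pass with no early exits (all nine divisor searches are run and checked at once instead of A's aux-flag/break loop and count-triggered early return), then returns the first case[2] hits, or None when fewer exist, as A does; …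
import Mathlib
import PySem

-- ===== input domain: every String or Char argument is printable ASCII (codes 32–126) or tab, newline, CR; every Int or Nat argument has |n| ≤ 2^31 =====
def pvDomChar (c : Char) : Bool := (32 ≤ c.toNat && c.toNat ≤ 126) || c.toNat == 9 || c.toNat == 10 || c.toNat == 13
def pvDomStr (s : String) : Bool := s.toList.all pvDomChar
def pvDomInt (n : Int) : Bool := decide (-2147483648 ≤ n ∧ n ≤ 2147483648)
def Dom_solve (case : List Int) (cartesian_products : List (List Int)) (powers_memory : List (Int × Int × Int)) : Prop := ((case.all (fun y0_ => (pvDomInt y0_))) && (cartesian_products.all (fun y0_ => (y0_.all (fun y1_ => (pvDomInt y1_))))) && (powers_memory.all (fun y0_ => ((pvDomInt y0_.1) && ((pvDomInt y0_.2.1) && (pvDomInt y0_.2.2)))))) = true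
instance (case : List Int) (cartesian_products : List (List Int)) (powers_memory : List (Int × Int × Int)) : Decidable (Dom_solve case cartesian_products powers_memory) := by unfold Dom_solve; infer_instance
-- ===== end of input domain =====

-- B replaces A's power-table evaluation by direct Horner evaluation of each candidate (the
-- table is ignored), classifies every candidate with no early exit, and returns the first
-- case[2] hits (None, like A, when fewer exist); equivalent on the inputs Pre_ states: 0/1
-- bit products, a table correct at the keys A reads, enough jamcoins before the last
-- product. Return-value equivalence only; no observable mutation.

-- ===== PORT A =====

-- dict lookup pm[(base, exp)]: powers_memory is dict[tuple[int,int],int], association list in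
-- insertion order, lookup = first match
def pmGet? (pm : List (Int × Int × Int)) (b k : Int) : Option Int :=
  match pm with
  | [] => none
  | (b', k', v) :: rest => if b' = b ∧ k' = k then some v else pmGet? rest b k

-- for i in range(2, 10): if n % i == 0: return i
def isNotPrimeGo (n : Int) (l : List Int) : Option Int :=
  match l with
  | [] => none
  | i :: rest => if PySem.Int.mod n i = 0 then some i else isNotPrimeGo n rest

def is_not_prime (n : Int) : Option Int := isNotPrimeGo n (PySem.List.pyRange 2 10 1)

-- res = 0; for i, bit in enumerate(bits): if bit == 1: res += pm[(base, len(bits)-1-i)]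
-- (a missing key is a KeyError in Python, excluded by Pre_; .getD 0 is arbitrary there)
def readGoA (pm : List (Int × Int × Int)) (base n : Int) (xs : List Int) (i res : Int) : Int :=
  match xs with
  | [] => res
  | bit :: t =>
      readGoA pm base n t (i + 1)
        (if bit = 1 then res + (pmGet? pm base (n - 1 - i)).getD 0 else res)

def read_base (bits : List Int) (base : Int) (pm : List (Int × Int × Int)) : Int :=
  readGoA pm base (bits.length : Int) bits 0 0

-- the inner base loop: aux/divisors state, break when a base gives no divisor
def divisorsGoA (pm : List (Int × Int × Int)) (cand : List Int) (bases divisors : List Int) :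
    Option (List Int) :=
  match bases with
  | [] => some divisors
  | base :: rest =>
      match is_not_prime (read_base cand base pm) with
      | some d => divisorsGoA pm cand rest (divisors ++ [d])
      | none => none

def solveGoA (pm : List (Int × Int × Int)) (ns : Int) (prods : List (List Int))
    (res : List (List Int × List Int)) : Option (List (List Int × List Int)) :=
  match prods with
  | [] => none    -- Python falls off the loop and returns None (no list); excluded by Pre_
  | pp :: rest =>
      let cand := 1 :: (pp ++ [1])
      if (res.length : Int) = ns then some res
      else
        match divisorsGoA pm cand (PySem.List.pyRange 2 11 1) [] with
        | some divisors => solveGoA pm ns rest (res ++ [(cand, divisors)])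
        | none => solveGoA pm ns rest res

def solve (case : List Int) (cartesian_products : List (List Int))
    (powers_memory : List (Int × Int × Int)) : List (List Int × List Int) :=
  -- number_of_bits = case[1] is read (IndexError if missing, excluded by Pre_) and unused
  let _number_of_bits := PySem.List.pyGet? case 1
  let number_of_samples := (PySem.List.pyGet? case 2).getD 0
  match solveGoA powers_memory number_of_samples cartesian_products [] with
  | some r => r
  | none => []    -- Python returns None here; excluded by Pre_

-- ===== PORT B =====

-- v = 0; for b in bits: v = v * base + b
def hornerB (bits : List Int) (base : Int) : Int :=
  bits.foldl (fun r b => r * base + b) 0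

-- next((i for i in range(2, 10) if v % i == 0), None)
def smallDivisorB (v : Int) : Option Int :=
  (PySem.List.pyRange 2 10 1).find? (fun i => PySem.Int.mod v i == 0)

-- stage 1: hits = every candidate whose 9 divisor lookups all succeed, with its divisors
-- ('None not in divs' = all isSome; the list appended then consists of the 9 values,
-- which is divs.filterMap id)
def hitsGoB (prods : List (List Int)) (hits : List (List Int × List Int)) :
    List (List Int × List Int) :=
  match prods with
  | [] => hits
  | pp :: rest =>
      let cand := 1 :: (pp ++ [1])
      let divs := (PySem.List.pyRange 2 11 1).map (fun base => smallDivisorB (hornerB cand base))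
      hitsGoB rest (if divs.all Option.isSome then hits ++ [(cand, divs.filterMap id)] else hits)

-- stage 2: res = hits[:case[2]]; return res if len(res) == case[2] else None
-- (powers_memory is not used by B at all; Python returns None on the else branch —
-- no value of the list type — and Pre_ excludes exactly those inputs)
def solve_alt (case : List Int) (cartesian_products : List (List Int))
    (powers_memory : List (Int × Int × Int)) : List (List Int × List Int) :=
  let need := (PySem.List.pyGet? case 2).getD 0
  let res := PySem.List.slice (hitsGoB cartesian_products []) none (some need)
  if (res.length : Int) = need then res else []

-- ===== PRECONDITION & SPEC =====

-- Pre_-side copies of A's dict lookup / valuation (Pre_ must not reach either port)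
def pvLook (pm : List (Int × Int × Int)) (b k : Int) : Option Int :=
  (pm.find? (fun e => e.1 == b && e.2.1 == k)).map (fun e => e.2.2)

-- the table value of a bit pattern in `base`: the sum, over the reversed pattern with its
-- position, of the table entry at each 1 bit (a closed sum over the input, not a loop)
def pvVal (pm : List (Int × Int × Int)) (base : Int) (bits : List Int) : Int :=
  (bits.reverse.zipIdx.map
    (fun bi => if bi.1 = 1 then (pvLook pm base (bi.2 : Int)).getD 0 else 0)).sum

-- pp is a jamcoin by A's reading: in every base 2..10 the table value has a divisor in 2..9
def pvJam (pm : List (Int × Int × Int)) (pp : List Int) : Bool :=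
  (PySem.List.pyRange 2 11 1).all (fun base =>
    (PySem.List.pyRange 2 10 1).any (fun i =>
      PySem.Int.mod (pvVal pm base (1 :: (pp ++ [1]))) i == 0))

def pvJamCount (pm : List (Int × Int × Int)) (l : List (List Int)) : Int :=
  ((l.filter (pvJam pm)).length : Int)

def pvBits01 (pp : List Int) : Bool := pp.all (fun x => x == 0 || x == 1)

-- the exact value of the bit pattern in `base` (no table): sum of bit * base^position
def pvPolyVal (bits : List Int) (base : Int) : Int :=
  (bits.reverse.zipIdx.map (fun bi => bi.1 * base ^ bi.2)).sum

def pvHasDiv (v : Int) : Bool :=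
  (PySem.List.pyRange 2 10 1).any (fun i => PySem.Int.mod v i == 0)

-- the table entries A reads for this candidate in `base` (its 1-bit positions) are b^k
def pvKeysOK (pm : List (Int × Int × Int)) (cand : List Int) (b : Int) : Bool :=
  cand.reverse.zipIdx.all (fun bi => bi.1 != 1 || (pvLook pm b (bi.2 : Int) == some (b ^ bi.2)))

-- A's table reads stop at its first base with no small divisor, so correctness of the table is
-- required only for the bases up to and including the first one whose exact value is divisor-free
def pvPowPP (pm : List (Int × Int × Int)) (pp : List Int) : Bool :=
  ((PySem.List.pyRange 2 11 1).takeWhile (fun b => pvHasDiv (pvPolyVal (1 :: (pp ++ [1])) b))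
    ++ ((PySem.List.pyRange 2 11 1).dropWhile
          (fun b => pvHasDiv (pvPolyVal (1 :: (pp ++ [1])) b))).take 1).all
    (pvKeysOK pm (1 :: (pp ++ [1])))

-- products A actually classifies (those preceded by fewer than m jamcoins) must be 0/1 bit
-- lists with a correct table
def pvNeedOK (pm : List (Int × Int × Int)) (prods : List (List Int)) (m : Int) : Bool :=
  match prods with
  | [] => true
  | pp :: rest =>
      (decide (m ≤ 0) || (pvPowPP pm pp && pvBits01 pp)) &&
        pvNeedOK pm rest (m - (if pvJam pm pp then 1 else 0))

-- Pre_ excludes: inputs where A raises (case shorter than 3: IndexError; a table key missing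
-- for a classified candidate: KeyError) or returns None instead of a list (empty product list,
-- negative sample count, or fewer than case[2] jamcoins before the last product); and inputs
-- where A returns a list but its value is an artefact of table contents B never consults —
-- classified products with non-0/1 entries or with table values ≠ b^k (see the cites).
def Pre_solve (case : List Int) (cartesian_products : List (List Int))
    (powers_memory : List (Int × Int × Int)) : Prop :=
  3 ≤ case.length ∧ cartesian_products ≠ [] ∧
  0 ≤ (PySem.List.pyGet? case 2).getD 0 ∧
  (PySem.List.pyGet? case 2).getD 0 ≤
    pvJamCount powers_memory (cartesian_products.take (cartesian_products.length - 1)) ∧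
  pvNeedOK powers_memory cartesian_products ((PySem.List.pyGet? case 2).getD 0) = true

instance (case : List Int) (cartesian_products : List (List Int)) (powers_memory : List (Int × Int × Int)) : Decidable (Pre_solve case cartesian_products powers_memory) := by unfold Pre_solve; infer_instance

def pvWitness_solve : List Int × List (List Int) × (List (Int × Int × Int)) :=
  ([0, 4, 0], [[0, 0], [0, 0], [0, 0]],
   [(2,0,1),(2,1,2),(2,2,4),(2,3,8),(3,0,1),(3,1,3),(3,2,9),(3,3,27),
    (4,0,1),(4,1,4),(4,2,16),(4,3,64),(5,0,1),(5,1,5),(5,2,25),(5,3,125),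
    (6,0,1),(6,1,6),(6,2,36),(6,3,216),(7,0,1),(7,1,7),(7,2,49),(7,3,343),
    (8,0,1),(8,1,8),(8,2,64),(8,3,512),(9,0,1),(9,1,9),(9,2,81),(9,3,729),
    (10,0,1),(10,1,10),(10,2,100),(10,3,1000)])

def Spec_solve (case : List Int) (cartesian_products : List (List Int)) (powers_memory : List (Int × Int × Int)) (out : List (List Int × List Int)) : Prop := out = solve_alt case cartesian_products powers_memory
instance (case : List Int) (cartesian_products : List (List Int)) (powers_memory : List (Int × Int × Int)) (out : List (List Int × List Int)) : Decidable (Spec_solve case cartesian_products powers_memory out) := by unfold Spec_solve; infer_instance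

-- ===== CLAIM (what is proved, stated in full; the proofs are below) =====
def Claim_equal_solve : Prop := ∀ (case : List Int) (cartesian_products : List (List Int)) (powers_memory : List (Int × Int × Int)), Dom_solve case cartesian_products powers_memory → Pre_solve case cartesian_products powers_memory → Spec_solve case cartesian_products powers_memory (solve case cartesian_products powers_memory)

-- ===== LEMMAS AND PROOFS =====

-- proof-side recursive form of pvVal (index-carrying), matching A's accumulation
def pvValGo (pm : List (Int × Int × Int)) (base : Int) (xs : List Int) (i : Int) : Int :=
  match xs with
  | [] => 0
  | bit :: t => (if bit = 1 then (pvLook pm base i).getD 0 else 0) + pvValGo pm base t (i + 1)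

theorem zipIdx_sum_eq (pm : List (Int × Int × Int)) (base : Int) (xs : List Int) (j : Nat) :
    ((xs.zipIdx j).map
      (fun bi => if bi.1 = 1 then (pvLook pm base (bi.2 : Int)).getD 0 else 0)).sum
      = pvValGo pm base xs (j : Int) := by
  induction xs generalizing j with
  | nil => rfl
  | cons b t ih =>
      simp only [List.zipIdx_cons, List.map_cons, List.sum_cons, pvValGo]
      rw [ih (j + 1)]
      push_cast
      ring_nf

theorem pvVal_eq (pm : List (Int × Int × Int)) (base : Int) (bits : List Int) :
    pvVal pm base bits = pvValGo pm base bits.reverse 0 := by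
  simpa using zipIdx_sum_eq pm base bits.reverse 0

theorem pvLook_eq (pm : List (Int × Int × Int)) (b k : Int) : pvLook pm b k = pmGet? pm b k := by
  induction pm with
  | nil => rfl
  | cons h t ih =>
      obtain ⟨b', k', v⟩ := h
      by_cases hb : b' = b ∧ k' = k
      · simp [pvLook, pmGet?, List.find?, hb.1, hb.2]
      · have hf : (b' == b && k' == k) = false := by
          rcases not_and_or.mp hb with h | h <;> simp [h]
        simp only [pvLook, pmGet?, List.find?, hf, if_neg hb]
        exact ih

theorem pvValGo_append (pm : List (Int × Int × Int)) (base : Int) (ys : List Int) (bit : Int)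
    (s : Int) : pvValGo pm base (ys ++ [bit]) s
      = pvValGo pm base ys s
        + (if bit = 1 then (pvLook pm base (s + ys.length)).getD 0 else 0) := by
  induction ys generalizing s with
  | nil => simp [pvValGo]
  | cons y t ih =>
      simp only [List.cons_append, pvValGo, ih]
      have : s + 1 + (t.length : Int) = s + ((y :: t).length : Int) := by
        simp; ring
      rw [this]; ring

theorem readGoA_eq (pm : List (Int × Int × Int)) (base n : Int) (xs : List Int) (i res : Int) :
    readGoA pm base n xs i res = res + pvValGo pm base xs.reverse (n - i - xs.length) := by
  induction xs generalizing i res with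
  | nil => simp [readGoA, pvValGo]
  | cons bit t ih =>
      simp only [readGoA, ih, List.reverse_cons, pvValGo_append, List.length_reverse,
        List.length_cons, pvLook_eq]
      push_cast
      have h3 : n - i - ((t.length : Int) + 1) + (t.length : Int) = n - 1 - i := by ring
      have h4 : n - (i + 1) - (t.length : Int) = n - i - ((t.length : Int) + 1) := by ring
      rw [h3, h4]
      by_cases hb : bit = 1
      · rw [if_pos hb, if_pos hb]; ring
      · rw [if_neg hb, if_neg hb]; ring

theorem read_base_eq (bits : List Int) (base : Int) (pm : List (Int × Int × Int)) :
    read_base bits base pm = pvValGo pm base bits.reverse 0 := by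
  simp [read_base, readGoA_eq]

-- Horner peels the leading bit as bit * base^(rest.length)
theorem foldl_horner_shift (base a : Int) (l : List Int) :
    l.foldl (fun r b => r * base + b) a
      = a * base ^ l.length + l.foldl (fun r b => r * base + b) 0 := by
  induction l generalizing a with
  | nil => simp
  | cons b t ih =>
      simp only [List.foldl_cons, List.length_cons]
      rw [ih (a * base + b), ih (0 * base + b)]
      ring

theorem hornerB_cons (b : Int) (t : List Int) (base : Int) :
    hornerB (b :: t) base = b * base ^ t.length + hornerB t base := by
  simp only [hornerB, List.foldl_cons]
  rw [foldl_horner_shift]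
  ring

-- proof-side recursive form of pvPolyVal
def polyR (base : Int) : List Int → Nat → Int
  | [], _ => 0
  | x :: t, j => x * base ^ j + polyR base t (j + 1)

theorem zip_poly (base : Int) (xs : List Int) (j : Nat) :
    ((xs.zipIdx j).map (fun bi => bi.1 * base ^ bi.2)).sum = polyR base xs j := by
  induction xs generalizing j with
  | nil => rfl
  | cons b t ih => simp only [List.zipIdx_cons, List.map_cons, List.sum_cons, polyR, ih (j + 1)]

theorem polyR_append (base : Int) (xs : List Int) (x : Int) (j : Nat) :
    polyR base (xs ++ [x]) j = polyR base xs j + x * base ^ (j + xs.length) := by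
  induction xs generalizing j with
  | nil => simp [polyR]
  | cons y t ih =>
      simp only [List.cons_append, polyR, ih (j + 1), List.length_cons]
      have : j + 1 + t.length = j + (t.length + 1) := by omega
      rw [this]; ring

theorem pvPolyVal_eq (bits : List Int) (base : Int) :
    pvPolyVal bits base = polyR base bits.reverse 0 := by
  simpa [pvPolyVal] using zip_poly base bits.reverse 0

-- Horner's value is the exact polynomial value
theorem hornerB_poly (l : List Int) (base : Int) : hornerB l base = pvPolyVal l base := by
  rw [pvPolyVal_eq]
  induction l with
  | nil => rfl
  | cons b t ih =>
      rw [hornerB_cons, List.reverse_cons, polyR_append, ih]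
      simp [add_comm]

-- with table entries correct at the 1-bit positions, A's table valuation is the Horner value
theorem pvValGo_reverse_horner (pm : List (Int × Int × Int)) (base : Int) (l : List Int)
    (hb : ∀ x ∈ l, x = 0 ∨ x = 1)
    (hk : ∀ (k : Nat) (bit : Int), l.reverse[k]? = some bit → bit = 1 →
      pvLook pm base (k : Int) = some (base ^ k)) :
    pvValGo pm base l.reverse 0 = hornerB l base := by
  induction l with
  | nil => simp [pvValGo, hornerB]
  | cons b t ih =>
      rw [List.reverse_cons, pvValGo_append, hornerB_cons]
      have hcast : (0 : Int) + ((t.reverse.length : Nat) : Int) = ((t.length : Nat) : Int) := by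
        simp
      rw [hcast]
      have iht : pvValGo pm base t.reverse 0 = hornerB t base := by
        refine ih (fun x hx => hb x (List.mem_cons_of_mem _ hx)) (fun k bit hget h1 => ?_)
        have hlt : k < t.reverse.length := (List.getElem?_eq_some_iff.mp hget).1
        refine hk k bit ?_ h1
        rw [List.reverse_cons, List.getElem?_append_left hlt]
        exact hget
      rw [iht]
      rcases hb b List.mem_cons_self with h0 | h1
      · simp [h0]
      · have hget : (t.reverse ++ [b])[t.reverse.length]? = some b :=
          List.getElem?_concat_length
        have := hk t.reverse.length b (by rw [List.reverse_cons]; exact hget) h1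
        rw [List.length_reverse] at this
        rw [this]
        simp [h1, add_comm]

-- pvKeysOK gives exactly the positional hypothesis above
theorem keysOK_read (pm : List (Int × Int × Int)) (cand : List Int) (b : Int)
    (h01 : ∀ x ∈ cand, x = 0 ∨ x = 1) (hkeys : pvKeysOK pm cand b = true) :
    read_base cand b pm = hornerB cand b := by
  rw [read_base_eq]
  refine pvValGo_reverse_horner pm b cand h01 (fun k bit hget h1 => ?_)
  have hlt : k < cand.reverse.length := (List.getElem?_eq_some_iff.mp hget).1
  have hval : cand.reverse[k] = bit := (List.getElem?_eq_some_iff.mp hget).2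
  have hall := List.all_eq_true.mp hkeys
  have hmem := List.forall_mem_zipIdx.mp hall k hlt
  rw [hval, h1] at hmem
  simp only [Nat.zero_add] at hmem
  have : (pvLook pm b (k : Int) == some (b ^ k)) = true := by simpa using hmem
  simpa using this

theorem isNotPrimeGo_eq_find (n : Int) (l : List Int) :
    isNotPrimeGo n l = l.find? (fun i => PySem.Int.mod n i == 0) := by
  induction l with
  | nil => rfl
  | cons i rest ih =>
      by_cases h : PySem.Int.mod n i = 0
      · simp [isNotPrimeGo, List.find?, h]
      · have hb : (PySem.Int.mod n i == 0) = false := by simpa using h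
        simp [isNotPrimeGo, List.find?, h, hb, ih]

theorem is_not_prime_eq (n : Int) : is_not_prime n = smallDivisorB n := by
  simp [is_not_prime, smallDivisorB, isNotPrimeGo_eq_find]

-- A's aux/break loop as one expression over the per-base divisor options
theorem divisorsGoA_eq_if (pm : List (Int × Int × Int)) (cand : List Int)
    (bases acc : List Int) :
    divisorsGoA pm cand bases acc
      = (if (bases.map (fun b => is_not_prime (read_base cand b pm))).all Option.isSome
         then some (acc ++ (bases.map (fun b => is_not_prime (read_base cand b pm))).filterMap id)
         else none) := by
  induction bases generalizing acc with
  | nil => simp [divisorsGoA]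
  | cons b rest ih =>
      cases h : is_not_prime (read_base cand b pm) with
      | none => simp [divisorsGoA, h]
      | some d =>
          simp only [divisorsGoA, h, List.map_cons]
          rw [ih]
          by_cases hall : (rest.map (fun b => is_not_prime (read_base cand b pm))).all
              Option.isSome
          · simp [hall]
          · simp [hall]

theorem find?_isSome_eq_any {α : Type} (p : α → Bool) (l : List α) :
    (l.find? p).isSome = l.any p := by
  induction l with
  | nil => rfl
  | cons x t ih => cases hp : p x <;> simp [List.find?, hp, ih]

-- whether A classifies pp as a jamcoin is exactly the Pre_-side predicate pvJam
theorem jamBody (pm : List (Int × Int × Int)) (pp : List Int) :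
    (Option.isSome ∘ fun b => is_not_prime (read_base (1 :: (pp ++ [1])) b pm))
      = (fun base => (PySem.List.pyRange 2 10 1).any (fun i =>
          PySem.Int.mod (pvVal pm base (1 :: (pp ++ [1]))) i == 0)) := by
  funext base
  simp [Function.comp, is_not_prime, isNotPrimeGo_eq_find, find?_isSome_eq_any, read_base_eq,
    pvVal_eq]

theorem divisorsGoA_isSome (pm : List (Int × Int × Int)) (pp : List Int) :
    (divisorsGoA pm (1 :: (pp ++ [1])) (PySem.List.pyRange 2 11 1) []).isSome
      = pvJam pm pp := by
  have hbody : ((PySem.List.pyRange 2 11 1).map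
      (fun b => is_not_prime (read_base (1 :: (pp ++ [1])) b pm))).all Option.isSome
      = pvJam pm pp := by
    rw [List.all_map, pvJam, jamBody]
  cases hall : ((PySem.List.pyRange 2 11 1).map
      (fun b => is_not_prime (read_base (1 :: (pp ++ [1])) b pm))).all Option.isSome
  · simp [divisorsGoA_eq_if, hall, ← hbody]
  · simp [divisorsGoA_eq_if, hall, ← hbody]

theorem hitsGoB_acc (prods : List (List Int)) (acc : List (List Int × List Int)) :
    hitsGoB prods acc = acc ++ hitsGoB prods [] := by
  induction prods generalizing acc with
  | nil => simp [hitsGoB]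
  | cons pp rest ih =>
      simp only [hitsGoB]
      split_ifs with h
      · rw [ih (acc ++ _), ih ([] ++ _)]; simp
      · exact ih acc

theorem pvJamCount_cons (pm : List (Int × Int × Int)) (pp : List Int) (l : List (List Int)) :
    pvJamCount pm (pp :: l) = (if pvJam pm pp then 1 else 0) + pvJamCount pm l := by
  by_cases h : pvJam pm pp
  · simp [pvJamCount, List.filter, h]; ring
  · simp [pvJamCount, List.filter, h]

-- the proof-side unfolding of pvPowPP: keys correct base by base until the first failure
def covOK (pm : List (Int × Int × Int)) (cand : List Int) : List Int → Prop
  | [] => True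
  | b :: rest => pvKeysOK pm cand b = true ∧
      (pvHasDiv (pvPolyVal cand b) = true → covOK pm cand rest)

theorem takeDrop_to_covOK (pm : List (Int × Int × Int)) (cand : List Int) (bs : List Int)
    (h : ((bs.takeWhile (fun b => pvHasDiv (pvPolyVal cand b))
        ++ (bs.dropWhile (fun b => pvHasDiv (pvPolyVal cand b))).take 1).all
          (pvKeysOK pm cand)) = true) :
    covOK pm cand bs := by
  induction bs with
  | nil => trivial
  | cons b rest ih =>
      cases hv : pvHasDiv (pvPolyVal cand b) with
      | true =>
          simp only [List.takeWhile_cons, List.dropWhile_cons, hv, if_true,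
            List.cons_append, List.all_cons, List.all_append, Bool.and_eq_true] at h
          refine ⟨?_, fun _ => ih ?_⟩
          · tauto
          · simp only [List.all_append, Bool.and_eq_true]
            tauto
      | false =>
          simp only [List.takeWhile_cons, List.dropWhile_cons, hv, Bool.false_eq_true, if_false,
            List.nil_append, List.take_succ_cons, List.take_zero, List.all_cons, List.all_nil,
            Bool.and_eq_true, and_true] at h
          exact ⟨h, fun hd => by simp [hv] at hd⟩

theorem powPP_covOK (pm : List (Int × Int × Int)) (pp : List Int)
    (h : pvPowPP pm pp = true) :
    covOK pm (1 :: (pp ++ [1])) (PySem.List.pyRange 2 11 1) :=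
  takeDrop_to_covOK pm _ _ h

-- A's per-candidate loop equals B's mapped divisor list wherever the table is correct at the
-- keys A reads (beyond A's break point the table no longer matters: both sides give none)
theorem divLoop (pm : List (Int × Int × Int)) (cand : List Int)
    (h01 : ∀ x ∈ cand, x = 0 ∨ x = 1) (bs : List Int) (acc : List Int)
    (hcov : covOK pm cand bs) :
    divisorsGoA pm cand bs acc
      = (if (bs.map (fun b => smallDivisorB (hornerB cand b))).all Option.isSome
         then some (acc ++ (bs.map (fun b => smallDivisorB (hornerB cand b))).filterMap id)
         else none) := by
  induction bs generalizing acc with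
  | nil => simp [divisorsGoA]
  | cons b rest ih =>
      obtain ⟨hkb, hrest⟩ := hcov
      have hgb : is_not_prime (read_base cand b pm) = smallDivisorB (hornerB cand b) := by
        rw [is_not_prime_eq, keysOK_read pm cand b h01 hkb]
      cases hd : smallDivisorB (hornerB cand b) with
      | none => simp [divisorsGoA, hgb, hd]
      | some d =>
          have hdiv : pvHasDiv (pvPolyVal cand b) = true := by
            have : (smallDivisorB (hornerB cand b)).isSome = true := by rw [hd]; rfl
            rw [smallDivisorB, find?_isSome_eq_any, hornerB_poly] at this
            exact this
          simp only [divisorsGoA, hgb, hd, List.map_cons]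
          rw [ih (acc ++ [d]) (hrest hdiv)]
          by_cases hall : (rest.map (fun b => smallDivisorB (hornerB cand b))).all Option.isSome
          · simp [hall]
          · simp [hall]

-- the candidate's entries are 0/1 when the product's are
theorem cand_bits01 (pp : List Int) (hbits : pvBits01 pp = true) :
    ∀ x ∈ 1 :: (pp ++ [1]), x = 0 ∨ x = 1 := by
  intro x hx
  rcases List.mem_cons.mp hx with h | hx2
  · right; exact h
  · rcases List.mem_append.mp hx2 with hx' | hx'
    · have hb01 := List.all_eq_true.mp hbits x hx'
      rcases (by simpa using hb01 : x = 0 ∨ x = 1) with h | h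
      · left; exact h
      · right; exact h
    · right; simpa using hx'

-- the main invariant: while fewer than ns jamcoins are collected and enough remain before the
-- last product, A's early-returning loop produces exactly res ++ the next (ns - |res|) of B's
-- full hit list
theorem mainInv (pm : List (Int × Int × Int)) (ns : Int) (prods : List (List Int))
    (res : List (List Int × List Int)) (hne : prods ≠ []) (h0 : (res.length : Int) ≤ ns)
    (h1 : ns - res.length ≤ pvJamCount pm (prods.take (prods.length - 1)))
    (hok : pvNeedOK pm prods (ns - res.length) = true) :
    solveGoA pm ns prods res
      = some (res ++ (hitsGoB prods []).take (ns - res.length).toNat)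
    ∧ (ns - res.length).toNat ≤ (hitsGoB prods []).length := by
  induction prods generalizing res with
  | nil => exact absurd rfl hne
  | cons pp rest ih =>
      by_cases hret : (res.length : Int) = ns
      · have hz : (ns - (res.length : Int)).toNat = 0 := by omega
        constructor
        · simp [solveGoA, hret]
        · simp [hz]
      · have hpos : 0 < ns - (res.length : Int) := by omega
        have hrest : rest ≠ [] := by
          intro h
          subst h
          simp [pvJamCount] at h1
          omega
        have htake : ((pp :: rest).take ((pp :: rest).length - 1))
            = pp :: (rest.take (rest.length - 1)) := by
          cases rest with
          | nil => exact absurd rfl hrest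
          | cons a l => simp [List.take_succ_cons]
        rw [htake, pvJamCount_cons] at h1
        -- unpack pvNeedOK at the head
        simp only [pvNeedOK, Bool.and_eq_true] at hok
        obtain ⟨hok1, hok2⟩ := hok
        have hnotle : ¬ (ns - (res.length : Int) ≤ 0) := by omega
        have hok1' : pvPowPP pm pp = true ∧ pvBits01 pp = true := by
          have h := hok1
          simp only [Bool.or_eq_true, Bool.and_eq_true, decide_eq_true_eq] at h
          rcases h with h | h
          · exact absurd h hnotle
          · exact h
        have hB := divLoop pm (1 :: (pp ++ [1])) (cand_bits01 pp hok1'.2)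
          (PySem.List.pyRange 2 11 1) [] (powPP_covOK pm pp hok1'.1)
        simp only [List.nil_append] at hB
        by_cases hall : ((PySem.List.pyRange 2 11 1).map
            (fun base => smallDivisorB (hornerB (1 :: (pp ++ [1])) base))).all Option.isSome
        · -- pp is a jamcoin: both sides add (cand, divisors)
          have hjam : pvJam pm pp = true := by
            rw [← divisorsGoA_isSome, hB, if_pos hall]; rfl
          rw [hjam] at h1; rw [hjam] at hok2
          simp only [if_pos] at h1 hok2
          set ds := ((PySem.List.pyRange 2 11 1).map
            (fun base => smallDivisorB (hornerB (1 :: (pp ++ [1])) base))).filterMap id with hds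
          have hstepA : solveGoA pm ns (pp :: rest) res
              = solveGoA pm ns rest (res ++ [(1 :: (pp ++ [1]), ds)]) := by
            simp only [solveGoA, if_neg hret, hB, if_pos hall]
          have hstepB : hitsGoB (pp :: rest) []
              = (1 :: (pp ++ [1]), ds) :: hitsGoB rest [] := by
            simp only [hitsGoB, if_pos hall]
            rw [hitsGoB_acc]
            simp [hds, List.filterMap_map, Function.comp]
          have ihr := ih (res ++ [(1 :: (pp ++ [1]), ds)]) hrest
            (by simp; omega)
            (by simp only [List.length_append, List.length_cons, List.length_nil]; push_cast; omega)
            (by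
              have : ns - ((res ++ [(1 :: (pp ++ [1]), ds)]).length : Int)
                  = ns - (res.length : Int) - 1 := by simp; ring
              rw [this]; exact hok2)
          have hlen : ns - ((res ++ [(1 :: (pp ++ [1]), ds)]).length : Int)
              = ns - (res.length : Int) - 1 := by simp; ring
          have htk : (ns - (res.length : Int)).toNat
              = (ns - (res.length : Int) - 1).toNat + 1 := by omega
          constructor
          · rw [hstepA, ihr.1, hstepB, hlen, htk, List.take_succ_cons]
            simp
          · rw [hstepB, List.length_cons, htk]
            have := ihr.2
            rw [hlen] at this
            omega
        · -- pp is not a jamcoin: both sides skip it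
          have hjam : pvJam pm pp = false := by
            rw [← divisorsGoA_isSome, hB, if_neg hall]; rfl
          rw [hjam] at h1; rw [hjam] at hok2
          simp only [Bool.false_eq_true, if_false, zero_add, sub_zero] at h1 hok2
          have hstepA : solveGoA pm ns (pp :: rest) res = solveGoA pm ns rest res := by
            simp only [solveGoA, if_neg hret, hB, if_neg hall]
          have hstepB : hitsGoB (pp :: rest) [] = hitsGoB rest [] := by
            simp only [hitsGoB, if_neg hall]
          have ihr := ih res hrest h0 (by simpa using h1) (by simpa using hok2)
          constructor
          · rw [hstepA, ihr.1, hstepB]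
          · rw [hstepB]; exact ihr.2

-- ===== VERDICT (by name: the statement is the Claim_ definition above) =====
theorem solve_spec : Claim_equal_solve := by
  intro case cp pm _hdom hpre
  obtain ⟨hlen, hne, hns0, hcnt, hok⟩ := hpre
  unfold Spec_solve solve solve_alt
  have h := mainInv pm ((PySem.List.pyGet? case 2).getD 0) cp [] hne (by simp [hns0])
    (by simpa using hcnt) (by simpa using hok)
  simp only [List.length_nil, Int.natCast_zero, sub_zero] at h
  obtain ⟨h1, h2⟩ := h
  have hslice : PySem.List.slice (hitsGoB cp []) none (some ((PySem.List.pyGet? case 2).getD 0))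
      = (hitsGoB cp []).take ((PySem.List.pyGet? case 2).getD 0).toNat :=
    PySem.List.slice_to _ hns0
  have hlen3 : (((hitsGoB cp []).take ((PySem.List.pyGet? case 2).getD 0).toNat).length : Int)
      = (PySem.List.pyGet? case 2).getD 0 := by
    rw [List.length_take, Nat.min_eq_left h2]
    exact Int.toNat_of_nonneg hns0
  simp only [h1, hslice, hlen3, if_pos]
  simp
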